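-- pv_equiv track=rewrite | github.com/Duongnv-dev/hr | bnk_appraisal/models/quick_appraisal.py | suggest_list_random
-- ===== SOURCE A (Python) =====
-- def suggest_list_random(dict_v, m):
--     lowest_key = m + 3
--     suggest_list_rand = []
--     for key in dict_v:
--         if not dict_v.get(key, False):
--             lowest_key = 0
--         else:
--             if len(dict_v[key]) <= lowest_key:
--                 lowest_key = len(dict_v[key])
--
--     for key in dict_v:
--         if len(dict_v[key]) == lowest_key:
--             suggest_list_rand.append(key)
--
--     if lowest_key == m:
--         return []
--     return suggest_list_rand
-- ===== SOURCE B (Python) =====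
-- def suggest_list_random(dict_v, m):
--     # One grouping pass: length of value list -> keys with that length (dict order).
--     groups = {}
--     for key, vals in dict_v.items():
--         groups.setdefault(len(vals), []).append(key)
--     # An empty value list always forces the minimum to 0; otherwise take the
--     # smallest occurring length, capped by m + 3.
--     if 0 in groups:
--         lowest = 0
--     else:
--         lowest = min([m + 3] + list(groups.keys()))
--     if lowest == m:
--         return []
--     return groups.get(lowest, [])
-- ===== Notes on version B (the rewrite author's own statement) =====
-- stated objective: alternative
-- what changed: Replaces A's two scans (a running-min pass with an empty-value reset, then a conditional collect pass) by a single grouping pass building a length->keys table, a min over the distinct lengths (with the m+3 cap and the empty-list-forces-0 rule), and one table lookup.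
import Mathlib
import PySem

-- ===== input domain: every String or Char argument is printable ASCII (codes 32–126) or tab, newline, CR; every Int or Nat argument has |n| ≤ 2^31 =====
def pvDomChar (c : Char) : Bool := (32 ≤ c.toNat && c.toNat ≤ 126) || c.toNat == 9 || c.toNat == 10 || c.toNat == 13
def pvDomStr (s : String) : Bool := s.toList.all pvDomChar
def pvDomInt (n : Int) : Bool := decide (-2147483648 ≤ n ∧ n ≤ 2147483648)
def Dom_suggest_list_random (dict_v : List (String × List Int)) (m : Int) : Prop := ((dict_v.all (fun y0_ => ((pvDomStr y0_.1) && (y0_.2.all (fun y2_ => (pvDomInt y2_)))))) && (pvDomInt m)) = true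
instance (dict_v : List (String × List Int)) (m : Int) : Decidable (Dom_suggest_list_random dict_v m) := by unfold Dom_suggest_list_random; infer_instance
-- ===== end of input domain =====

-- B replaces A's two scans (running min with empty-value reset, then a conditional collect)
-- by one grouping pass (length -> keys), a min over the distinct lengths, and a table lookup
-- (objective: alternative; same cost).

-- ===== PORT A =====
-- A iterates over a Python dict: 'for key in dict_v' and 'dict_v[key]' / 'dict_v.get(key, False)'
-- become iteration over d.keys with d.getD key [] (every iterated key is present, so the
-- 'False' default is unreachable and falsiness of the looked-up value is .isEmpty).
def suggest_list_random (dict_v : List (String × List Int)) (m : Int) : List String :=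
  let d : PySem.Dict String (List Int) := PySem.Dict.mk dict_v
  let lowest_key : Int := d.keys.foldl (fun lk key =>
      if (d.getD key []).isEmpty then 0
      else if ((d.getD key []).length : Int) ≤ lk then ((d.getD key []).length : Int) else lk)
    (m + 3)
  let suggest_list_rand : List String := d.keys.foldl (fun acc key =>
      if ((d.getD key []).length : Int) = lowest_key then acc ++ [key] else acc) []
  if lowest_key = m then [] else suggest_list_rand

-- ===== PORT B =====
def suggest_list_random_alt (dict_v : List (String × List Int)) (m : Int) : List String :=
  let groups : PySem.Dict Int (List String) :=
    (dict_v.map (fun kv => ((kv.2.length : Int), kv.1))).foldl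
      (fun g p => g.modify p.1 [] (fun x => x ++ [p.2])) PySem.Dict.empty
  let lowest : Int :=
    if groups.contains 0 then 0
    else (PySem.List.min? ((m + 3) :: groups.keys) (fun y => y)).getD 0
  if lowest = m then [] else groups.getD lowest []

-- ===== PRECONDITION & SPEC =====
-- Pre_ only requires pairwise-distinct keys: the Python argument is a dict, which cannot
-- hold duplicate keys, so association lists with repeated keys represent no real input.
def Pre_suggest_list_random (dict_v : List (String × List Int)) (m : Int) : Prop :=
  (dict_v.map Prod.fst).Nodup
instance (dict_v : List (String × List Int)) (m : Int) : Decidable (Pre_suggest_list_random dict_v m) := by unfold Pre_suggest_list_random; infer_instance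
def pvWitness_suggest_list_random : (List (String × List Int)) × Int :=
  ([("a", [1, 2]), ("b", [3]), ("c", [])], 5)
def Spec_suggest_list_random (dict_v : List (String × List Int)) (m : Int) (out : List String) : Prop := out = suggest_list_random_alt dict_v m
instance (dict_v : List (String × List Int)) (m : Int) (out : List String) : Decidable (Spec_suggest_list_random dict_v m out) := by unfold Spec_suggest_list_random; infer_instance

-- ===== CLAIM (what is proved, stated in full; the proofs are below) =====
def Claim_equal_suggest_list_random : Prop := ∀ (dict_v : List (String × List Int)) (m : Int), Dom_suggest_list_random dict_v m → Pre_suggest_list_random dict_v m → Spec_suggest_list_random dict_v m (suggest_list_random dict_v m)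

-- ===== LEMMAS AND PROOFS =====

-- A's first loop, rewritten over the entry list (valid under Nodup keys).
def pvStepA (lk : Int) (kv : String × List Int) : Int :=
  if kv.2.isEmpty then 0
  else if ((kv.2.length : Int)) ≤ lk then ((kv.2.length : Int)) else lk

-- folds over d.keys with getD collapse to folds over the entries, given Nodup keys
theorem pv_foldl_keys_getD {β : Type} (dict_v : List (String × List Int))
    (hnd : (dict_v.map Prod.fst).Nodup)
    (f : β → String → List Int → β) (init : β) :
    ((PySem.Dict.mk dict_v).keys.foldl
        (fun acc key => f acc key ((PySem.Dict.mk dict_v).getD key [])) init)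
      = dict_v.foldl (fun acc kv => f acc kv.1 kv.2) init := by
  rw [PySem.Dict.keys_mk, List.foldl_map]
  refine PySem.List.foldl_congr_mem _ _ _ _ ?_
  intro acc kv hkv
  have hitems : (kv.1, kv.2) ∈ (PySem.Dict.mk dict_v).items := by
    simpa [PySem.Dict.items] using hkv
  have hkeys : (PySem.Dict.mk dict_v).keys.Nodup := by
    simpa [PySem.Dict.keys_mk] using hnd
  rw [PySem.Dict.getD_of_mem_items _ hitems hkeys]

theorem pv_stepA_zero (l : List (String × List Int)) : l.foldl pvStepA 0 = 0 := by
  induction l with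
  | nil => rfl
  | cons kv t ih =>
      have hstep : pvStepA 0 kv = 0 := by
        by_cases h : kv.2.isEmpty
        · simp [pvStepA, h]
        · simp [pvStepA, h]
      rw [List.foldl_cons, hstep]
      exact ih

theorem pv_stepA_of_empty (l : List (String × List Int)) (i : Int)
    (h : ∃ kv ∈ l, kv.2 = []) : l.foldl pvStepA i = 0 := by
  induction l generalizing i with
  | nil => simp at h
  | cons kv t ih =>
      rcases h with ⟨kv', hmem, hempty⟩
      rcases List.mem_cons.mp hmem with h1 | h1
      · subst h1
        simp [List.foldl_cons, pvStepA, hempty, pv_stepA_zero]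
      · rw [List.foldl_cons]
        exact ih _ ⟨kv', h1, hempty⟩

theorem pv_stepA_min (l : List (String × List Int)) (i : Int)
    (h : ∀ kv ∈ l, kv.2 ≠ []) :
    l.foldl pvStepA i = (l.map (fun kv => ((kv.2.length : Int)))).foldl min i := by
  rw [List.foldl_map]
  refine PySem.List.foldl_congr_mem _ _ _ _ ?_
  intro acc kv hkv
  have hne : kv.2.isEmpty = false := by
    simpa [List.isEmpty_iff] using h kv hkv
  simp only [pvStepA, hne, Bool.false_eq_true, if_false]
  rcases le_total ((kv.2.length : Int)) acc with hle | hle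
  · simp [hle]
  · have : ¬ ((kv.2.length : Int) ≤ acc) ∨ (kv.2.length : Int) = acc := by omega
    rcases this with h1 | h1
    · simp [h1, min_eq_left (by omega)]
    · simp [h1]

-- folding min over a list with the same members gives the same value
theorem pv_foldl_min_le_init (l : List Int) (i : Int) : l.foldl min i ≤ i := by
  induction l generalizing i with
  | nil => simp
  | cons x t ih => exact le_trans (ih (min i x)) (min_le_left _ _)

theorem pv_foldl_min_le_mem (l : List Int) (i x : Int) (hx : x ∈ l) : l.foldl min i ≤ x := by
  induction l generalizing i with
  | nil => simp at hx
  | cons y t ih =>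
      rcases List.mem_cons.mp hx with h1 | h1
      · subst h1
        exact le_trans (pv_foldl_min_le_init t (min i x)) (min_le_right _ _)
      · exact ih _ h1

theorem pv_foldl_min_mem (l : List Int) (i : Int) : l.foldl min i = i ∨ l.foldl min i ∈ l := by
  induction l generalizing i with
  | nil => simp
  | cons x t ih =>
      rcases ih (min i x) with h1 | h1
      · rcases le_total i x with hle | hle
        · left; simpa [List.foldl_cons, min_eq_left hle] using h1
        · right; rw [List.foldl_cons, h1, min_eq_right hle]; exact List.mem_cons_self
      · right; exact List.mem_cons.mpr (Or.inr (by simpa [List.foldl_cons] using h1))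

theorem pv_foldl_min_congr (l l' : List Int) (i : Int)
    (h : ∀ x, x ∈ l ↔ x ∈ l') : l.foldl min i = l'.foldl min i := by
  apply le_antisymm
  · rcases pv_foldl_min_mem l' i with h1 | h1
    · rw [h1]; exact pv_foldl_min_le_init _ _
    · exact pv_foldl_min_le_mem _ _ _ ((h _).mpr h1)
  · rcases pv_foldl_min_mem l i with h1 | h1
    · rw [h1]; exact pv_foldl_min_le_init _ _
    · exact pv_foldl_min_le_mem _ _ _ ((h _).mp h1)

-- B's grouping table: keys and lookups
theorem pv_groups_keys (dict_v : List (String × List Int)) :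
    ((dict_v.map (fun kv => ((kv.2.length : Int), kv.1))).foldl
      (fun g p => g.modify p.1 [] (fun x => x ++ [p.2])) PySem.Dict.empty).keys
    = PySem.Set.update ([] : List Int) (dict_v.map (fun kv => ((kv.2.length : Int)))) := by
  rw [PySem.Dict.keys_foldl_modify_key]
  simp [PySem.Dict.keys_empty, List.map_map, Function.comp_def]

theorem pv_groups_getD (dict_v : List (String × List Int)) (L : Int) :
    ((dict_v.map (fun kv => ((kv.2.length : Int), kv.1))).foldl
      (fun g p => g.modify p.1 [] (fun x => x ++ [p.2])) PySem.Dict.empty).getD L []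
    = (dict_v.filter (fun kv => ((kv.2.length : Int)) == L)).map Prod.fst := by
  rw [PySem.Dict.getD_foldl_modify_append]
  simp [PySem.Dict.getD_empty, List.filter_map, List.map_map, Function.comp_def]

-- A's second loop is the same filter
theorem pv_collect (dict_v : List (String × List Int)) (L : Int) :
    dict_v.foldl (fun acc kv => if ((kv.2.length : Int)) = L then acc ++ [kv.1] else acc) []
    = (dict_v.filter (fun kv => ((kv.2.length : Int)) == L)).map Prod.fst := by
  have := PySem.List.foldl_append_if (fun kv : String × List Int => ((kv.2.length : Int)) == L)
    Prod.fst dict_v []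
  simpa [beq_iff_eq] using this -- Bool test ↔ Prop test

theorem pv_lowest_eq (dict_v : List (String × List Int)) (m : Int) :
    dict_v.foldl pvStepA (m + 3)
    = (if ((dict_v.map (fun kv => ((kv.2.length : Int), kv.1))).foldl
          (fun g p => g.modify p.1 [] (fun x => x ++ [p.2])) PySem.Dict.empty).contains 0 then 0
       else (PySem.List.min? ((m + 3) ::
          ((dict_v.map (fun kv => ((kv.2.length : Int), kv.1))).foldl
            (fun g p => g.modify p.1 [] (fun x => x ++ [p.2])) PySem.Dict.empty).keys)
          (fun y => y)).getD 0) := by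
  have hkeys := pv_groups_keys dict_v
  have hmemkeys : ∀ x : Int,
      x ∈ ((dict_v.map (fun kv => ((kv.2.length : Int), kv.1))).foldl
        (fun g p => g.modify p.1 [] (fun x => x ++ [p.2])) PySem.Dict.empty).keys
      ↔ x ∈ dict_v.map (fun kv => ((kv.2.length : Int))) := by
    intro x
    rw [hkeys]
    simpa using PySem.Set.mem_update ([] : List Int) _ x
  by_cases hemp : ∃ kv ∈ dict_v, kv.2 = []
  · have hc : ((dict_v.map (fun kv => ((kv.2.length : Int), kv.1))).foldl
        (fun g p => g.modify p.1 [] (fun x => x ++ [p.2])) PySem.Dict.empty).contains 0 = true := by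
      rw [PySem.Dict.contains_iff_mem_keys, hmemkeys]
      rcases hemp with ⟨kv, hmem, he⟩
      exact List.mem_map.mpr ⟨kv, hmem, by simp [he]⟩
    rw [pv_stepA_of_empty dict_v _ hemp, hc, if_pos rfl]
  · have hne : ∀ kv ∈ dict_v, kv.2 ≠ [] := by
      intro kv hkv hcon; exact hemp ⟨kv, hkv, hcon⟩
    have hc : ((dict_v.map (fun kv => ((kv.2.length : Int), kv.1))).foldl
        (fun g p => g.modify p.1 [] (fun x => x ++ [p.2])) PySem.Dict.empty).contains 0 = false := by
      rw [Bool.eq_false_iff]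
      intro hcon
      rw [PySem.Dict.contains_iff_mem_keys, hmemkeys] at hcon
      rcases List.mem_map.mp hcon with ⟨kv, hmem, he⟩
      exact hne kv hmem (List.length_eq_zero_iff.mp (by omega))
    rw [hc, if_neg (by simp), PySem.List.min?_id_cons, Option.getD_some,
      pv_stepA_min dict_v _ hne]
    exact pv_foldl_min_congr _ _ _ (fun x => (hmemkeys x).symm)

-- ===== VERDICT (by name: the statement is the Claim_ definition above) =====
theorem suggest_list_random_spec : Claim_equal_suggest_list_random := by
  intro dict_v m _ hpre
  simp only [Spec_suggest_list_random, suggest_list_random, suggest_list_random_alt]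
  have hA : ((PySem.Dict.mk dict_v).keys.foldl (fun lk key =>
      if ((PySem.Dict.mk dict_v).getD key []).isEmpty then 0
      else if (((PySem.Dict.mk dict_v).getD key []).length : Int) ≤ lk
        then (((PySem.Dict.mk dict_v).getD key []).length : Int) else lk) (m + 3))
      = dict_v.foldl pvStepA (m + 3) :=
    pv_foldl_keys_getD dict_v hpre
      (fun (lk : Int) (_key : String) (v : List Int) =>
        if v.isEmpty then 0 else if ((v.length : Int)) ≤ lk then ((v.length : Int)) else lk) (m + 3)
  rw [hA, pv_lowest_eq dict_v m]
  set L := (if ((dict_v.map (fun kv => ((kv.2.length : Int), kv.1))).foldl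
          (fun g p => g.modify p.1 [] (fun x => x ++ [p.2])) PySem.Dict.empty).contains 0 then 0
       else (PySem.List.min? ((m + 3) ::
          ((dict_v.map (fun kv => ((kv.2.length : Int), kv.1))).foldl
            (fun g p => g.modify p.1 [] (fun x => x ++ [p.2])) PySem.Dict.empty).keys)
          (fun y => y)).getD 0) with hL
  have hC : ((PySem.Dict.mk dict_v).keys.foldl (fun acc key =>
      if (((PySem.Dict.mk dict_v).getD key []).length : Int) = L then acc ++ [key] else acc) [])
      = ((dict_v.map (fun kv => ((kv.2.length : Int), kv.1))).foldl
          (fun g p => g.modify p.1 [] (fun x => x ++ [p.2])) PySem.Dict.empty).getD L [] := by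
    have h2 : ((PySem.Dict.mk dict_v).keys.foldl (fun acc key =>
        if (((PySem.Dict.mk dict_v).getD key []).length : Int) = L then acc ++ [key] else acc) [])
        = dict_v.foldl (fun acc kv => if ((kv.2.length : Int)) = L then acc ++ [kv.1] else acc) [] :=
      pv_foldl_keys_getD dict_v hpre
        (fun (acc : List String) (key : String) (v : List Int) =>
          if ((v.length : Int)) = L then acc ++ [key] else acc) ([] : List String)
    exact h2.trans ((pv_collect dict_v L).trans (pv_groups_getD dict_v L).symm)
  by_cases hm : L = m
  · simp [hm]
  · simp only [if_neg hm]
    exact hC
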